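-- pv_equiv track=rewrite | github.com/yinhw0210/dataAnalysis-backend | src/app/doubao/extractor.py | _decode_url
-- ===== SOURCE A (Python) =====
-- def _decode_url(url: str) -> str:
--     """解码 URL"""
--     if not url:
--         return ''
--     while '\\\\' in url:
--         url = url.replace('\\\\', '\\')
--     url = url.replace('\\u002F', '/')
--     url = url.replace('\\u0026', '&')
--     url = url.replace('\\/', '/')
--     url = url.replace('\\&', '&')
--     url = url.rstrip('\\')
--     return url
-- ===== SOURCE B (Python) =====
-- def _decode_url(url: str) -> str:
--     """解码 URL"""
--     out = []
--     i, n = 0, len(url)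
--     while i < n:
--         ch = url[i]
--         if ch != '\\':
--             out.append(ch)
--             i += 1
--             continue
--         # skip the whole run of backslashes (it collapses to a single one)
--         while i < n and url[i] == '\\':
--             i += 1
--         rest = url[i:]
--         if rest.startswith('u002F'):
--             out.append('/')
--             i += 5
--         elif rest.startswith('u0026'):
--             out.append('&')
--             i += 5
--         elif rest.startswith('/'):
--             out.append('/')
--             i += 1
--         elif rest.startswith('&'):
--             out.append('&')
--             i += 1
--         elif rest:
--             out.append('\\')
--         # a run at the very end of the string is stripped (rstrip('\\'))
--     return ''.join(out)
-- ===== Notes on version B (the rewrite author's own statement) =====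
-- stated objective: alternative
-- what changed: A collapses runs of backslashes by repeatedly replacing pairs until a fixpoint and then applies four literal escape replacements plus a right-strip; B makes a single left-to-right scan that collapses each run and decodes the escape following it in the same pass, dropping a trailing run.
import Mathlib
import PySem

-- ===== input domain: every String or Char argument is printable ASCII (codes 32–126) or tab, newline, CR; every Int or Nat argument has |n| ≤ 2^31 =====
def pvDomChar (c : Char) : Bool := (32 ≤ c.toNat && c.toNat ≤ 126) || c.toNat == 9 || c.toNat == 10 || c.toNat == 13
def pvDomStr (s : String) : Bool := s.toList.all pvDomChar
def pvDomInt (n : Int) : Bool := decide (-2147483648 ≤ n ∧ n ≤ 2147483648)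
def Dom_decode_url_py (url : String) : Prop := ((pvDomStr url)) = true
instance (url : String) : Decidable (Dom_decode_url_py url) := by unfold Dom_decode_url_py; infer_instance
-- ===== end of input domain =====

-- B replaces A's replace-to-fixpoint backslash collapsing by one left-to-right scan that
-- collapses each backslash run and decodes the escapes in the same pass (one pass, no rescans).

-- ===== PORT A =====
-- one-pass characterisation of PySem.Chars.replace (non-empty pattern), used only to prove
-- that the loop body shrinks the string (termination of pvALoop)
def pvRepOne (old new : List Char) : List Char → List Char
  | [] => []
  | c :: t =>
    if old.isPrefixOf (c :: t) then new ++ pvRepOne old new (t.drop (old.length - 1))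
    else c :: pvRepOne old new t
termination_by l => l.length
decreasing_by
  · exact Nat.lt_succ_of_le (List.length_drop (l := t) ▸ Nat.sub_le _ _)
  · exact Nat.lt_succ_self _

theorem pvGo_eq (old new : List Char) (hold : old ≠ []) :
    ∀ (fuel : Nat) (l acc : List Char), l.length ≤ fuel →
      PySem.Chars.replace.go old new fuel l acc = acc.reverse ++ pvRepOne old new l := by
  intro fuel
  induction fuel with
  | zero =>
    intro l acc hl
    have hnil : l = [] := by cases l <;> simp_all
    subst hnil
    simp [PySem.Chars.replace.go, pvRepOne]
  | succ n ih =>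
    intro l acc hl
    cases l with
    | nil => simp [PySem.Chars.replace.go, pvRepOne]
    | cons c t =>
      by_cases hp : old.isPrefixOf (c :: t)
      · have hdrop : List.drop old.length (c :: t) = t.drop (old.length - 1) := by
          cases old with
          | nil => exact absurd rfl hold
          | cons a as => simp [List.drop]
        have hlen : (t.drop (old.length - 1)).length ≤ n := by
          simp at hl ⊢
          omega
        simp only [PySem.Chars.replace.go, hp, if_pos, if_true]
        rw [hdrop, ih _ _ hlen]
        simp [pvRepOne, hp]
      · have hlen : t.length ≤ n := by simp at hl; omega
        simp only [PySem.Chars.replace.go, hp, if_false, Bool.false_eq_true, if_neg]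
        rw [ih _ _ hlen]
        simp [pvRepOne, hp]

theorem pvReplace_eq (old new l : List Char) (hold : old ≠ []) :
    PySem.Chars.replace l old new = pvRepOne old new l := by
  have hne : old.isEmpty = false := by cases old <;> simp_all
  simp [PySem.Chars.replace, hne]
  exact pvGo_eq old new hold l.length l [] (le_refl _)

theorem pvRepOne_len_le (x : List Char) :
    (pvRepOne ['\\', '\\'] ['\\'] x).length ≤ x.length := by
  suffices H : ∀ (n : Nat) (x : List Char), x.length ≤ n →
      (pvRepOne ['\\', '\\'] ['\\'] x).length ≤ x.length from H x.length x (le_refl _)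
  intro n
  induction n with
  | zero => intro x hx; have : x = [] := by cases x <;> simp_all
            subst this; simp [pvRepOne]
  | succ n ih =>
    intro x hx
    cases x with
    | nil => simp [pvRepOne]
    | cons c t =>
      by_cases hp : List.isPrefixOf ['\\', '\\'] (c :: t)
      · obtain ⟨c2, t', rfl⟩ : ∃ c2 t', t = c2 :: t' := by
          cases t with
          | nil => simp [List.isPrefixOf] at hp
          | cons a b => exact ⟨a, b, rfl⟩
        have := ih t' (by simp at hx; omega)
        simp [pvRepOne, hp] at this ⊢
        omega
      · have := ih t (by simp at hx; omega)
        simp [pvRepOne, hp]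
        omega

theorem pvRepOne_len_lt (x : List Char) (h : ['\\', '\\'] <:+: x) :
    (pvRepOne ['\\', '\\'] ['\\'] x).length < x.length := by
  induction x with
  | nil => simp at h
  | cons c t ih =>
    by_cases hp : List.isPrefixOf ['\\', '\\'] (c :: t)
    · obtain ⟨c2, t', rfl⟩ : ∃ c2 t', t = c2 :: t' := by
        cases t with
        | nil => simp [List.isPrefixOf] at hp
        | cons a b => exact ⟨a, b, rfl⟩
      have := pvRepOne_len_le t'
      simp [pvRepOne, hp]
      omega
    · have hinf : ['\\', '\\'] <:+: t := by
        rcases List.infix_cons_iff.mp h with hpre | hinf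
        · exact absurd ((List.isPrefixOf_iff_prefix).mpr hpre) hp
        · exact hinf
      have := ih hinf
      simp [pvRepOne, hp]
      omega

theorem pvReplace_len_lt (x : List Char) (h : PySem.Chars.isIn ['\\', '\\'] x = true) :
    (PySem.Chars.replace x ['\\', '\\'] ['\\']).length < x.length := by
  rw [pvReplace_eq _ _ _ (by simp)]
  exact pvRepOne_len_lt x ((PySem.Chars.isIn_iff_infix _ _).mp h)

-- the `while '\\\\' in url: url = url.replace('\\\\', '\\')` loop
def pvALoop (l : List Char) : List Char :=
  if h : PySem.Chars.isIn ['\\', '\\'] l = true then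
    pvALoop (PySem.Chars.replace l ['\\', '\\'] ['\\'])
  else l
termination_by l.length
decreasing_by exact pvReplace_len_lt l h

-- hand port of url.rstrip('\\') (exact: drops the trailing backslashes)
def pvRstripBs (l : List Char) : List Char :=
  (l.reverse.dropWhile (fun c => c = '\\')).reverse

def decode_url_py (url : String) : String :=
  if url = "" then ""
  else
    let u0 := pvALoop url.toList
    let u1 := PySem.Chars.replace u0 "\\u002F".toList "/".toList
    let u2 := PySem.Chars.replace u1 "\\u0026".toList "&".toList
    let u3 := PySem.Chars.replace u2 "\\/".toList "/".toList
    let u4 := PySem.Chars.replace u3 "\\&".toList "&".toList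
    String.ofList (pvRstripBs u4)

-- ===== PORT B =====
def pvBScan : List Char → List Char
  | [] => []
  | c :: t =>
    if c ≠ '\\' then c :: pvBScan t
    else
      let rest := t.dropWhile (fun x => x = '\\')
      if PySem.Chars.startswith rest "u002F".toList then '/' :: pvBScan (rest.drop 5)
      else if PySem.Chars.startswith rest "u0026".toList then '&' :: pvBScan (rest.drop 5)
      else if PySem.Chars.startswith rest "/".toList then '/' :: pvBScan (rest.drop 1)
      else if PySem.Chars.startswith rest "&".toList then '&' :: pvBScan (rest.drop 1)
      else if rest ≠ [] then '\\' :: pvBScan rest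
      else []
termination_by l => l.length
decreasing_by
  all_goals simp_all
  all_goals exact Nat.le_trans (List.length_dropWhile_le _ _) (by omega)

def decode_url_py_alt (url : String) : String :=
  String.ofList (pvBScan url.toList)

-- ===== PRECONDITION & SPEC =====
def Spec_decode_url_py (url : String) (out : String) : Prop := out = decode_url_py_alt url
instance (url : String) (out : String) : Decidable (Spec_decode_url_py url out) := by unfold Spec_decode_url_py; infer_instance

-- ===== CLAIM (what is proved, stated in full; the proofs are below) =====
def Claim_equal_decode_url_py : Prop := ∀ (url : String), Dom_decode_url_py url → Spec_decode_url_py url (decode_url_py url)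

-- ===== LEMMAS AND PROOFS =====

-- the normal form: every backslash run collapsed to a single backslash
def pvCollapse : List Char → List Char
  | [] => []
  | c :: t =>
    if c = '\\' then '\\' :: pvCollapse (t.dropWhile (fun x => x = '\\'))
    else c :: pvCollapse t
termination_by l => l.length
decreasing_by
  · exact Nat.lt_succ_of_le (List.length_dropWhile_le _ _)
  · exact Nat.lt_succ_self _

theorem pvDW_head (t : List Char) :
    t.dropWhile (fun x => x = '\\') = [] ∨
      ∃ c s, t.dropWhile (fun x => x = '\\') = c :: s ∧ c ≠ '\\' := by
  induction t with
  | nil => exact Or.inl rfl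
  | cons c t ih =>
    by_cases h : c = '\\'
    · simpa [List.dropWhile, h] using ih
    · exact Or.inr ⟨c, t, by simp [List.dropWhile, h], h⟩

theorem pvRepOne_cons_neg (old new : List Char) (c : Char) (t : List Char)
    (h : old.isPrefixOf (c :: t) = false) :
    pvRepOne old new (c :: t) = c :: pvRepOne old new t := by
  rw [pvRepOne]; simp [h]

theorem pvRepOne_cons_pos (old new : List Char) (c : Char) (t : List Char)
    (h : old.isPrefixOf (c :: t) = true) :
    pvRepOne old new (c :: t) = new ++ pvRepOne old new (t.drop (old.length - 1)) := by
  rw [pvRepOne]; simp [h]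

theorem pvCollapse_cons_bs (t : List Char) :
    pvCollapse ('\\' :: t) = '\\' :: pvCollapse (t.dropWhile (fun x => x = '\\')) := by
  rw [pvCollapse]; simp

theorem pvCollapse_cons (c : Char) (t : List Char) (h : ¬ c = '\\') :
    pvCollapse (c :: t) = c :: pvCollapse t := by
  rw [pvCollapse]; simp [h]

theorem pvNotPrefix_of_head (c : Char) (t : List Char) (hc : ¬ c = '\\') :
    List.isPrefixOf ['\\', '\\'] (c :: t) = false := by
  simp [List.isPrefixOf]
  exact fun h => absurd h.symm hc

theorem pvNotPrefix_of_snd (c2 : Char) (t' : List Char) (hc2 : ¬ c2 = '\\') :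
    List.isPrefixOf ['\\', '\\'] ('\\' :: c2 :: t') = false := by
  simp [List.isPrefixOf]
  exact fun h => absurd h.symm hc2

theorem pvDropWhile_cons_neg (c : Char) (t : List Char) (hc : ¬ c = '\\') :
    (c :: t).dropWhile (fun x => x = '\\') = c :: t := by
  simp [List.dropWhile, hc]

theorem pvS (x : List Char) :
    (pvRepOne ['\\', '\\'] ['\\'] x).dropWhile (fun c => c = '\\') =
      pvRepOne ['\\', '\\'] ['\\'] (x.dropWhile (fun c => c = '\\')) := by
  suffices H : ∀ (n : Nat) (x : List Char), x.length ≤ n →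
      (pvRepOne ['\\', '\\'] ['\\'] x).dropWhile (fun c => c = '\\') =
        pvRepOne ['\\', '\\'] ['\\'] (x.dropWhile (fun c => c = '\\')) from
    H x.length x (le_refl _)
  intro n
  induction n with
  | zero =>
    intro x hx
    have : x = [] := by cases x <;> simp_all
    subst this; simp [pvRepOne]
  | succ n ih =>
    intro x hx
    cases x with
    | nil => simp [pvRepOne]
    | cons c t =>
      by_cases hc : c = '\\'
      · subst hc
        cases t with
        | nil => simp [pvRepOne, List.isPrefixOf, List.dropWhile]
        | cons c2 t' =>
          by_cases hc2 : c2 = '\\'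
          · subst hc2
            rw [pvRepOne_cons_pos _ _ _ _ (by simp [List.isPrefixOf])]
            have iht := ih t' (by simp at hx; omega)
            simp only [List.length_cons, List.singleton_append, List.drop_succ_cons,
              List.length_nil, Nat.zero_add, Nat.add_sub_cancel, List.drop_zero]
            simp [List.dropWhile, iht]
          · rw [pvRepOne_cons_neg _ _ _ _ (pvNotPrefix_of_snd c2 t' hc2)]
            rw [pvRepOne_cons_neg _ _ _ _ (pvNotPrefix_of_head c2 t' hc2)]
            simp [List.dropWhile, hc2]
            rw [pvRepOne_cons_neg _ _ _ _ (pvNotPrefix_of_head c2 t' hc2)]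
      · rw [pvRepOne_cons_neg _ _ _ _ (pvNotPrefix_of_head c t hc)]
        rw [pvDropWhile_cons_neg c _ hc, pvDropWhile_cons_neg c t hc]
        rw [pvRepOne_cons_neg _ _ _ _ (pvNotPrefix_of_head c t hc)]

theorem pvCollapse_repOne (x : List Char) :
    pvCollapse (pvRepOne ['\\', '\\'] ['\\'] x) = pvCollapse x := by
  suffices H : ∀ (n : Nat) (x : List Char), x.length ≤ n →
      pvCollapse (pvRepOne ['\\', '\\'] ['\\'] x) = pvCollapse x from
    H x.length x (le_refl _)
  intro n
  induction n with
  | zero =>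
    intro x hx
    have : x = [] := by cases x <;> simp_all
    subst this; simp [pvRepOne]
  | succ n ih =>
    intro x hx
    cases x with
    | nil => simp [pvRepOne]
    | cons c t =>
      by_cases hc : c = '\\'
      · subst hc
        cases t with
        | nil =>
          rw [pvRepOne_cons_neg _ _ _ _ (by simp [List.isPrefixOf])]
          simp [pvRepOne]
        | cons c2 t' =>
          by_cases hc2 : c2 = '\\'
          · subst hc2
            rw [pvRepOne_cons_pos _ _ _ _ (by simp [List.isPrefixOf])]
            simp only [List.length_cons, List.length_nil, Nat.zero_add,
              Nat.add_sub_cancel, List.drop_succ_cons, List.drop_zero,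
              List.singleton_append]
            rw [pvCollapse_cons_bs, pvCollapse_cons_bs]
            rw [pvS]
            have hdw : List.dropWhile (fun x => x = '\\') ('\\' :: t') =
                List.dropWhile (fun x => x = '\\') t' := by simp [List.dropWhile]
            rw [hdw]
            congr 1
            exact ih _ (le_trans (List.length_dropWhile_le _ _) (by simp at hx; omega))
          · rw [pvRepOne_cons_neg _ _ _ _ (pvNotPrefix_of_snd c2 t' hc2)]
            rw [pvCollapse_cons_bs, pvCollapse_cons_bs]
            rw [pvS]
            rw [pvDropWhile_cons_neg c2 t' hc2]
            congr 1
            exact ih _ (by simp at hx ⊢; omega)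
      · rw [pvRepOne_cons_neg _ _ _ _ (pvNotPrefix_of_head c t hc)]
        rw [pvCollapse_cons c _ hc, pvCollapse_cons c t hc]
        congr 1
        exact ih _ (by simp at hx; omega)

theorem pvCollapse_of_noPair (x : List Char) (h : ¬ ['\\', '\\'] <:+: x) :
    pvCollapse x = x := by
  induction x with
  | nil => simp [pvCollapse]
  | cons c t ih =>
    have ht : ¬ ['\\', '\\'] <:+: t := fun hh => h (by
      obtain ⟨s, u, huu⟩ := hh
      exact ⟨c :: s, u, by simp [huu]⟩)
    by_cases hc : c = '\\'
    · subst hc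
      have hdw : t.dropWhile (fun x => x = '\\') = t := by
        cases t with
        | nil => rfl
        | cons c2 t' =>
          have hc2 : ¬ c2 = '\\' := by
            intro hh; subst hh
            exact h ⟨[], t', rfl⟩
          exact pvDropWhile_cons_neg c2 t' hc2
      rw [pvCollapse_cons_bs, hdw, ih ht]
    · rw [pvCollapse_cons c t hc, ih ht]

theorem pvALoop_eq_collapse (x : List Char) : pvALoop x = pvCollapse x := by
  suffices H : ∀ (n : Nat) (x : List Char), x.length ≤ n → pvALoop x = pvCollapse x from
    H x.length x (le_refl _)
  intro n
  induction n with
  | zero =>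
    intro x hx
    have : x = [] := by cases x <;> simp_all
    subst this
    rw [pvALoop]
    have h0 : PySem.Chars.isIn ['\\', '\\'] ([] : List Char) = false := by decide
    simp [h0, pvCollapse]
  | succ n ih =>
    intro x hx
    by_cases hin : PySem.Chars.isIn ['\\', '\\'] x = true
    · rw [pvALoop]
      simp only [hin, if_pos]
      have hlt := pvReplace_len_lt x hin
      rw [pvReplace_eq _ _ _ (by simp)] at hlt ⊢
      rw [ih _ (by omega)]
      exact pvCollapse_repOne x
    · rw [pvALoop]
      simp only [hin, if_neg, Bool.false_eq_true, not_false_eq_true, if_false]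
      exact (pvCollapse_of_noPair x ((PySem.Chars.isIn_eq_false_iff _ _).mp
        (by simpa using hin))).symm

-- the four literal replaces of A, as one composite
def pvRep4 (m : List Char) : List Char :=
  pvRepOne ['\\', '&'] ['&'] (pvRepOne ['\\', '/'] ['/']
    (pvRepOne ['\\', 'u', '0', '0', '2', '6'] ['&']
      (pvRepOne ['\\', 'u', '0', '0', '2', 'F'] ['/'] m)))

theorem pvNotPrefix_bs_head (p' : List Char) (c : Char) (t : List Char) (hc : ¬ c = '\\') :
    List.isPrefixOf ('\\' :: p') (c :: t) = false := by
  simp [List.isPrefixOf]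
  exact fun h => absurd h.symm hc

theorem pvRstripBs_cons (c : Char) (x : List Char) (hc : ¬ c = '\\') :
    pvRstripBs (c :: x) = c :: pvRstripBs x := by
  unfold pvRstripBs
  rw [List.reverse_cons, List.dropWhile_append]
  split_ifs with h
  · simp only [List.isEmpty_iff] at h
    simp [List.dropWhile, hc, h]
  · simp

theorem pvRstripBs_cons_bs (x : List Char) (h : pvRstripBs x ≠ []) :
    pvRstripBs ('\\' :: x) = '\\' :: pvRstripBs x := by
  unfold pvRstripBs at h ⊢
  rw [List.reverse_cons, List.dropWhile_append]
  split_ifs with h2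
  · exact absurd (by simp [List.isEmpty_iff.mp h2]) h
  · simp

theorem pvPrefix_collapse_iff (q x : List Char) (hq : '\\' ∉ q) :
    q <+: pvCollapse x ↔ q <+: x := by
  suffices H : ∀ (n : Nat) (x q : List Char), x.length ≤ n → '\\' ∉ q →
      (q <+: pvCollapse x ↔ q <+: x) from H x.length x q (le_refl _) hq
  intro n
  induction n with
  | zero =>
    intro x q hx _
    have : x = [] := by cases x <;> simp_all
    subst this; simp [pvCollapse]
  | succ n ih =>
    intro x q hx hq
    cases x with
    | nil => simp [pvCollapse]
    | cons c t =>
      cases q with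
      | nil => simp
      | cons a q' =>
        have ha : ¬ a = '\\' := by intro h; exact hq (h ▸ List.mem_cons_self)
        by_cases hc : c = '\\'
        · subst hc
          rw [pvCollapse_cons_bs]
          constructor
          · intro h
            exact absurd ((List.cons_prefix_cons.mp h).1) ha
          · intro h
            exact absurd ((List.cons_prefix_cons.mp h).1) ha
        · rw [pvCollapse_cons c t hc]
          rw [List.cons_prefix_cons, List.cons_prefix_cons]
          have := ih t q' (by simp at hx; omega) (fun h => hq (List.mem_cons_of_mem _ h))
          rw [this]

theorem pvPrefix_r1_iff (q x : List Char) (hq : '\\' ∉ q) (hq2 : '/' ∉ q) :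
    q <+: pvRepOne ['\\', 'u', '0', '0', '2', 'F'] ['/'] x ↔ q <+: x := by
  suffices H : ∀ (n : Nat) (x q : List Char), x.length ≤ n → '\\' ∉ q → '/' ∉ q →
      (q <+: pvRepOne ['\\', 'u', '0', '0', '2', 'F'] ['/'] x ↔ q <+: x) from
    H x.length x q (le_refl _) hq hq2
  intro n
  induction n with
  | zero =>
    intro x q hx _ _
    have : x = [] := by cases x <;> simp_all
    subst this; simp [pvRepOne]
  | succ n ih =>
    intro x q hx hq hq2
    cases x with
    | nil => simp [pvRepOne]
    | cons c t =>
      cases hp : List.isPrefixOf ['\\', 'u', '0', '0', '2', 'F'] (c :: t) with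
      | true =>
        rw [pvRepOne_cons_pos _ _ _ _ hp]
        have hc : c = '\\' := by
          cases hbeq : ('\\' == c) with
          | false => rw [List.isPrefixOf] at hp; simp [hbeq] at hp
          | true => exact (beq_iff_eq.mp hbeq).symm
        cases q with
        | nil => simp
        | cons a q' =>
          have ha : ¬ a = '\\' := by intro h; exact hq (h ▸ List.mem_cons_self)
          have ha2 : ¬ a = '/' := by intro h; exact hq2 (h ▸ List.mem_cons_self)
          constructor
          · intro h
            exact absurd ((List.cons_prefix_cons.mp h).1) ha2
          · intro h
            subst hc
            exact absurd ((List.cons_prefix_cons.mp h).1) ha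
      | false =>
        rw [pvRepOne_cons_neg _ _ _ _ hp]
        cases q with
        | nil => simp
        | cons a q' =>
          rw [List.cons_prefix_cons, List.cons_prefix_cons]
          have := ih t q' (by simp at hx; omega) (fun h => hq (List.mem_cons_of_mem _ h))
            (fun h => hq2 (List.mem_cons_of_mem _ h))
          rw [this]

theorem pvRep4_cons_other (c : Char) (X : List Char) (hc : ¬ c = '\\') :
    pvRep4 (c :: X) = c :: pvRep4 X := by
  unfold pvRep4
  rw [pvRepOne_cons_neg _ _ _ _ (pvNotPrefix_bs_head _ c X hc),
      pvRepOne_cons_neg _ _ _ _ (pvNotPrefix_bs_head _ c _ hc),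
      pvRepOne_cons_neg _ _ _ _ (pvNotPrefix_bs_head _ c _ hc),
      pvRepOne_cons_neg _ _ _ _ (pvNotPrefix_bs_head _ c _ hc)]

theorem pvRep4_bs_u002F (X : List Char) :
    pvRep4 ('\\' :: 'u' :: '0' :: '0' :: '2' :: 'F' :: X) = '/' :: pvRep4 X := by
  unfold pvRep4
  rw [pvRepOne_cons_pos _ _ _ _ (by simp [List.isPrefixOf])]
  simp only [List.length_cons, List.length_nil, List.drop_succ_cons, List.drop_zero,
    List.singleton_append, Nat.zero_add, Nat.add_sub_cancel]
  rw [pvRepOne_cons_neg _ _ _ _ (pvNotPrefix_bs_head _ '/' _ (by decide)),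
      pvRepOne_cons_neg _ _ _ _ (pvNotPrefix_bs_head _ '/' _ (by decide)),
      pvRepOne_cons_neg _ _ _ _ (pvNotPrefix_bs_head _ '/' _ (by decide))]

theorem pvRep4_bs_u0026 (X : List Char) :
    pvRep4 ('\\' :: 'u' :: '0' :: '0' :: '2' :: '6' :: X) = '&' :: pvRep4 X := by
  unfold pvRep4
  rw [pvRepOne_cons_neg _ _ _ _ (by simp [List.isPrefixOf]),
      pvRepOne_cons_neg _ _ _ _ (pvNotPrefix_bs_head _ 'u' _ (by decide)),
      pvRepOne_cons_neg _ _ _ _ (pvNotPrefix_bs_head _ '0' _ (by decide)),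
      pvRepOne_cons_neg _ _ _ _ (pvNotPrefix_bs_head _ '0' _ (by decide)),
      pvRepOne_cons_neg _ _ _ _ (pvNotPrefix_bs_head _ '2' _ (by decide)),
      pvRepOne_cons_neg _ _ _ _ (pvNotPrefix_bs_head _ '6' _ (by decide))]
  rw [pvRepOne_cons_pos _ _ _ _ (by simp [List.isPrefixOf])]
  simp only [List.length_cons, List.length_nil, List.drop_succ_cons, List.drop_zero,
    List.singleton_append, Nat.zero_add, Nat.add_sub_cancel]
  rw [pvRepOne_cons_neg _ _ _ _ (pvNotPrefix_bs_head _ '&' _ (by decide)),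
      pvRepOne_cons_neg _ _ _ _ (pvNotPrefix_bs_head _ '&' _ (by decide))]

theorem pvRep4_bs_slash (X : List Char) :
    pvRep4 ('\\' :: '/' :: X) = '/' :: pvRep4 X := by
  unfold pvRep4
  rw [pvRepOne_cons_neg _ _ _ _ (by simp [List.isPrefixOf]),
      pvRepOne_cons_neg _ _ _ _ (pvNotPrefix_bs_head _ '/' _ (by decide)),
      pvRepOne_cons_neg _ _ _ _ (by simp [List.isPrefixOf]),
      pvRepOne_cons_neg _ _ _ _ (pvNotPrefix_bs_head _ '/' _ (by decide))]
  rw [pvRepOne_cons_pos _ _ _ _ (by simp [List.isPrefixOf])]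
  simp only [List.length_cons, List.length_nil, List.drop_succ_cons, List.drop_zero,
    List.singleton_append, Nat.zero_add, Nat.add_sub_cancel]
  rw [pvRepOne_cons_neg _ _ _ _ (pvNotPrefix_bs_head _ '/' _ (by decide))]

theorem pvRep4_bs_amp (X : List Char) :
    pvRep4 ('\\' :: '&' :: X) = '&' :: pvRep4 X := by
  unfold pvRep4
  rw [pvRepOne_cons_neg _ _ _ _ (by simp [List.isPrefixOf]),
      pvRepOne_cons_neg _ _ _ _ (pvNotPrefix_bs_head _ '&' _ (by decide)),
      pvRepOne_cons_neg _ _ _ _ (by simp [List.isPrefixOf]),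
      pvRepOne_cons_neg _ _ _ _ (pvNotPrefix_bs_head _ '&' _ (by decide)),
      pvRepOne_cons_neg _ _ _ _ (by simp [List.isPrefixOf]),
      pvRepOne_cons_neg _ _ _ _ (pvNotPrefix_bs_head _ '&' _ (by decide))]
  rw [pvRepOne_cons_pos _ _ _ _ (by simp [List.isPrefixOf])]
  simp only [List.length_cons, List.length_nil, List.drop_succ_cons, List.drop_zero,
    List.singleton_append, Nat.zero_add, Nat.add_sub_cancel]

theorem pvRep4_bs_other (ch : Char) (X : List Char) (hch : ¬ ch = '\\')
    (h1 : ¬ ['u', '0', '0', '2', 'F'] <+: (ch :: X))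
    (h2 : ¬ ['u', '0', '0', '2', '6'] <+: (ch :: X))
    (h3 : ¬ ch = '/') (h4 : ¬ ch = '&') :
    pvRep4 ('\\' :: ch :: X) = '\\' :: ch :: pvRep4 X := by
  unfold pvRep4
  have hb1 : List.isPrefixOf ['\\', 'u', '0', '0', '2', 'F'] ('\\' :: ch :: X) = false := by
    rw [← Bool.not_eq_true, List.isPrefixOf_iff_prefix]
    intro hp
    exact h1 (List.cons_prefix_cons.mp hp).2
  rw [pvRepOne_cons_neg _ _ _ _ hb1,
      pvRepOne_cons_neg _ _ _ _ (pvNotPrefix_bs_head _ ch _ hch)]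
  have hb2 : List.isPrefixOf ['\\', 'u', '0', '0', '2', '6']
      ('\\' :: ch :: pvRepOne ['\\', 'u', '0', '0', '2', 'F'] ['/'] X) = false := by
    rw [← Bool.not_eq_true, List.isPrefixOf_iff_prefix]
    intro hp
    obtain ⟨hchu, htail⟩ := List.cons_prefix_cons.mp (List.cons_prefix_cons.mp hp).2
    exact h2 (List.cons_prefix_cons.mpr
      ⟨hchu, (pvPrefix_r1_iff _ _ (by decide) (by decide)).mp htail⟩)
  rw [pvRepOne_cons_neg _ _ _ _ hb2,
      pvRepOne_cons_neg _ _ _ _ (pvNotPrefix_bs_head _ ch _ hch)]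
  have hb3 : ∀ Y : List Char, List.isPrefixOf ['\\', '/'] ('\\' :: ch :: Y) = false := by
    intro Y
    rw [← Bool.not_eq_true, List.isPrefixOf_iff_prefix]
    intro hp
    exact h3 ((List.cons_prefix_cons.mp (List.cons_prefix_cons.mp hp).2).1).symm
  rw [pvRepOne_cons_neg _ _ _ _ (hb3 _),
      pvRepOne_cons_neg _ _ _ _ (pvNotPrefix_bs_head _ ch _ hch)]
  have hb4 : ∀ Y : List Char, List.isPrefixOf ['\\', '&'] ('\\' :: ch :: Y) = false := by
    intro Y
    rw [← Bool.not_eq_true, List.isPrefixOf_iff_prefix]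
    intro hp
    exact h4 ((List.cons_prefix_cons.mp (List.cons_prefix_cons.mp hp).2).1).symm
  rw [pvRepOne_cons_neg _ _ _ _ (hb4 _),
      pvRepOne_cons_neg _ _ _ _ (pvNotPrefix_bs_head _ ch _ hch)]

theorem pvBScan_cons_other (c : Char) (t : List Char) (hc : ¬ c = '\\') :
    pvBScan (c :: t) = c :: pvBScan t := by
  rw [pvBScan]; simp [hc]

theorem pvBScan_cons_bs (t : List Char) :
    pvBScan ('\\' :: t) =
      (if PySem.Chars.startswith (t.dropWhile (fun x => x = '\\')) "u002F".toList then
        '/' :: pvBScan ((t.dropWhile (fun x => x = '\\')).drop 5)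
      else if PySem.Chars.startswith (t.dropWhile (fun x => x = '\\')) "u0026".toList then
        '&' :: pvBScan ((t.dropWhile (fun x => x = '\\')).drop 5)
      else if PySem.Chars.startswith (t.dropWhile (fun x => x = '\\')) "/".toList then
        '/' :: pvBScan ((t.dropWhile (fun x => x = '\\')).drop 1)
      else if PySem.Chars.startswith (t.dropWhile (fun x => x = '\\')) "&".toList then
        '&' :: pvBScan ((t.dropWhile (fun x => x = '\\')).drop 1)
      else if t.dropWhile (fun x => x = '\\') ≠ [] then
        '\\' :: pvBScan (t.dropWhile (fun x => x = '\\'))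
      else []) := by
  rw [pvBScan]; simp

theorem pvMain (x : List Char) :
    pvBScan x = pvRstripBs (pvRep4 (pvCollapse x)) := by
  suffices H : ∀ (n : Nat) (x : List Char), x.length ≤ n →
      pvBScan x = pvRstripBs (pvRep4 (pvCollapse x)) from H x.length x (le_refl _)
  intro n
  induction n with
  | zero =>
    intro x hx
    have : x = [] := by cases x <;> simp_all
    subst this
    simp [pvBScan, pvCollapse, pvRep4, pvRepOne, pvRstripBs]
  | succ n ih =>
    intro x hx
    cases x with
    | nil => simp [pvBScan, pvCollapse, pvRep4, pvRepOne, pvRstripBs]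
    | cons c t =>
      have htn : t.length ≤ n := by simp at hx; omega
      by_cases hc : c = '\\'
      · subst hc
        rw [pvBScan_cons_bs, pvCollapse_cons_bs]
        have hrlen := List.length_dropWhile_le (fun x => decide (x = '\\')) t
        rcases pvDW_head t with hre | ⟨ch, s, hr, hch⟩
        · rw [hre] at hrlen ⊢
          have c1 : PySem.Chars.startswith ([] : List Char) "u002F".toList = false := by decide
          have c2 : PySem.Chars.startswith ([] : List Char) "u0026".toList = false := by decide
          have c3 : PySem.Chars.startswith ([] : List Char) "/".toList = false := by decide
          have c4 : PySem.Chars.startswith ([] : List Char) "&".toList = false := by decide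
          simp only [c1, c2, c3, c4, Bool.false_eq_true, if_false, ne_eq,
            not_true_eq_false, if_neg, not_false_eq_true]
          have hcol : pvCollapse ([] : List Char) = [] := by simp [pvCollapse]
          rw [hcol]
          have e1 : pvRepOne ['\\', 'u', '0', '0', '2', 'F'] ['/'] ['\\'] = ['\\'] := by
            rw [pvRepOne_cons_neg ['\\', 'u', '0', '0', '2', 'F'] ['/'] '\\' [] (by decide)]
            simp [pvRepOne]
          have e2 : pvRepOne ['\\', 'u', '0', '0', '2', '6'] ['&'] ['\\'] = ['\\'] := by
            rw [pvRepOne_cons_neg ['\\', 'u', '0', '0', '2', '6'] ['&'] '\\' [] (by decide)]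
            simp [pvRepOne]
          have e3 : pvRepOne ['\\', '/'] ['/'] ['\\'] = ['\\'] := by
            rw [pvRepOne_cons_neg ['\\', '/'] ['/'] '\\' [] (by decide)]
            simp [pvRepOne]
          have e4 : pvRepOne ['\\', '&'] ['&'] ['\\'] = ['\\'] := by
            rw [pvRepOne_cons_neg ['\\', '&'] ['&'] '\\' [] (by decide)]
            simp [pvRepOne]
          have h4 : pvRep4 ['\\'] = ['\\'] := by
            unfold pvRep4
            rw [e1, e2, e3, e4]
          rw [h4]
          simp [pvRstripBs, List.dropWhile]
        · rw [hr] at hrlen ⊢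
          cases h1 : PySem.Chars.startswith (ch :: s) "u002F".toList with
          | true =>
            have hpre := (PySem.Chars.startswith_iff _ _).mp h1
            rw [show "u002F".toList = ['u', '0', '0', '2', 'F'] from rfl] at hpre
            obtain ⟨s5, hs5⟩ := hpre
            simp only [List.cons_append, List.nil_append] at hs5
            obtain ⟨rfl, rfl⟩ : ch = 'u' ∧ s = '0' :: '0' :: '2' :: 'F' :: s5 := by
              injection hs5 with a b; exact ⟨a.symm, b.symm⟩
            rw [if_pos rfl]
            have hd5 : (('u' :: '0' :: '0' :: '2' :: 'F' :: s5).drop 5) = s5 := by simp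
            rw [hd5]
            rw [pvCollapse_cons 'u' _ (by decide), pvCollapse_cons '0' _ (by decide),
              pvCollapse_cons '0' _ (by decide), pvCollapse_cons '2' _ (by decide),
              pvCollapse_cons 'F' _ (by decide)]
            rw [pvRep4_bs_u002F, pvRstripBs_cons _ _ (by decide)]
            congr 1
            exact ih s5 (by simp at hrlen; omega)
          | false =>
          rw [if_neg (by simp [h1])]
          cases h2 : PySem.Chars.startswith (ch :: s) "u0026".toList with
          | true =>
            have hpre := (PySem.Chars.startswith_iff _ _).mp h2
            rw [show "u0026".toList = ['u', '0', '0', '2', '6'] from rfl] at hpre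
            obtain ⟨s5, hs5⟩ := hpre
            simp only [List.cons_append, List.nil_append] at hs5
            obtain ⟨rfl, rfl⟩ : ch = 'u' ∧ s = '0' :: '0' :: '2' :: '6' :: s5 := by
              injection hs5 with a b; exact ⟨a.symm, b.symm⟩
            rw [if_pos rfl]
            have hd5 : (('u' :: '0' :: '0' :: '2' :: '6' :: s5).drop 5) = s5 := by simp
            rw [hd5]
            rw [pvCollapse_cons 'u' _ (by decide), pvCollapse_cons '0' _ (by decide),
              pvCollapse_cons '0' _ (by decide), pvCollapse_cons '2' _ (by decide),
              pvCollapse_cons '6' _ (by decide)]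
            rw [pvRep4_bs_u0026, pvRstripBs_cons _ _ (by decide)]
            congr 1
            exact ih s5 (by simp at hrlen; omega)
          | false =>
          rw [if_neg (by simp [h2])]
          cases h3 : PySem.Chars.startswith (ch :: s) "/".toList with
          | true =>
            have hpre := (PySem.Chars.startswith_iff _ _).mp h3
            rw [show "/".toList = ['/'] from rfl] at hpre
            obtain ⟨s1, hs1⟩ := hpre
            simp only [List.cons_append, List.nil_append] at hs1
            obtain ⟨rfl, hs⟩ : ch = '/' ∧ s1 = s := by
              injection hs1 with a b; exact ⟨a.symm, b⟩
            rw [if_pos rfl]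
            rw [show (('/' :: s).drop 1) = s from rfl]
            rw [pvCollapse_cons '/' _ (by decide)]
            rw [pvRep4_bs_slash, pvRstripBs_cons _ _ (by decide)]
            congr 1
            exact ih s (by simp at hrlen; omega)
          | false =>
          rw [if_neg (by simp [h3])]
          cases h4 : PySem.Chars.startswith (ch :: s) "&".toList with
          | true =>
            have hpre := (PySem.Chars.startswith_iff _ _).mp h4
            rw [show "&".toList = ['&'] from rfl] at hpre
            obtain ⟨s1, hs1⟩ := hpre
            simp only [List.cons_append, List.nil_append] at hs1
            obtain ⟨rfl, hs⟩ : ch = '&' ∧ s1 = s := by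
              injection hs1 with a b; exact ⟨a.symm, b⟩
            rw [if_pos rfl]
            rw [show (('&' :: s).drop 1) = s from rfl]
            rw [pvCollapse_cons '&' _ (by decide)]
            rw [pvRep4_bs_amp, pvRstripBs_cons _ _ (by decide)]
            congr 1
            exact ih s (by simp at hrlen; omega)
          | false =>
            rw [if_neg (by simp [h4])]
            rw [if_pos (by simp)]
            rw [pvBScan_cons_other ch s hch]
            rw [pvCollapse_cons ch s hch]
            have hp1 : ¬ ['u', '0', '0', '2', 'F'] <+: (ch :: pvCollapse s) := by
              intro hp
              obtain ⟨hchu, htail⟩ := List.cons_prefix_cons.mp hp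
              have := (pvPrefix_collapse_iff _ s (by decide)).mp htail
              have hT : PySem.Chars.startswith (ch :: s) "u002F".toList = true := by
                rw [PySem.Chars.startswith_iff]
                rw [show "u002F".toList = ['u', '0', '0', '2', 'F'] from rfl]
                exact List.cons_prefix_cons.mpr ⟨hchu, this⟩
              rw [h1] at hT; exact Bool.false_ne_true hT
            have hp2 : ¬ ['u', '0', '0', '2', '6'] <+: (ch :: pvCollapse s) := by
              intro hp
              obtain ⟨hchu, htail⟩ := List.cons_prefix_cons.mp hp
              have := (pvPrefix_collapse_iff _ s (by decide)).mp htail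
              have hT : PySem.Chars.startswith (ch :: s) "u0026".toList = true := by
                rw [PySem.Chars.startswith_iff]
                rw [show "u0026".toList = ['u', '0', '0', '2', '6'] from rfl]
                exact List.cons_prefix_cons.mpr ⟨hchu, this⟩
              rw [h2] at hT; exact Bool.false_ne_true hT
            have hp3 : ¬ ch = '/' := by
              intro hh
              have hT : PySem.Chars.startswith (ch :: s) "/".toList = true := by
                rw [PySem.Chars.startswith_iff]
                exact List.cons_prefix_cons.mpr ⟨hh.symm, List.nil_prefix⟩
              rw [h3] at hT; exact Bool.false_ne_true hT
            have hp4 : ¬ ch = '&' := by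
              intro hh
              have hT : PySem.Chars.startswith (ch :: s) "&".toList = true := by
                rw [PySem.Chars.startswith_iff]
                exact List.cons_prefix_cons.mpr ⟨hh.symm, List.nil_prefix⟩
              rw [h4] at hT; exact Bool.false_ne_true hT
            rw [pvRep4_bs_other ch _ hch hp1 hp2 hp3 hp4]
            have hinner : pvRstripBs (ch :: pvRep4 (pvCollapse s)) =
                ch :: pvRstripBs (pvRep4 (pvCollapse s)) :=
              pvRstripBs_cons _ _ hch
            rw [pvRstripBs_cons_bs _ (by rw [hinner]; exact List.cons_ne_nil _ _), hinner]
            have := ih s (by simp at hrlen; omega)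
            rw [this]
      · rw [pvBScan_cons_other c t hc, pvCollapse_cons c t hc,
          pvRep4_cons_other c _ hc, pvRstripBs_cons c _ hc]
        congr 1
        exact ih t htn

theorem decode_url_py_spec' : ∀ url, decode_url_py url = decode_url_py_alt url := by
  intro url
  by_cases h : url = ""
  · subst h
    show "" = decode_url_py_alt ""
    have : pvBScan ([] : List Char) = [] := by simp [pvBScan]
    simp [decode_url_py_alt, this]
  · unfold decode_url_py
    rw [if_neg h]
    show String.ofList (pvRstripBs
      (PySem.Chars.replace
        (PySem.Chars.replace
          (PySem.Chars.replace
            (PySem.Chars.replace (pvALoop url.toList) "\\u002F".toList "/".toList)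
            "\\u0026".toList "&".toList)
          "\\/".toList "/".toList)
        "\\&".toList "&".toList)) = decode_url_py_alt url
    rw [pvReplace_eq _ _ _ (by decide), pvReplace_eq _ _ _ (by decide),
      pvReplace_eq _ _ _ (by decide), pvReplace_eq _ _ _ (by decide)]
    rw [pvALoop_eq_collapse]
    show String.ofList (pvRstripBs (pvRep4 (pvCollapse url.toList))) = decode_url_py_alt url
    rw [← pvMain]
    rfl

-- ===== VERDICT (by name: the statement is the Claim_ definition above) =====
theorem decode_url_py_spec : Claim_equal_decode_url_py := by
  intro url _
  unfold Spec_decode_url_py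
  exact decode_url_py_spec' url
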